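-- pv_equiv track=rewrite | github.com/mshivam3003/ats_score | src/ats_grading.py | _pdf_literal_string
-- ===== SOURCE A (Python) =====
-- def _pdf_literal_string(text: str) -> str:
--     raw = (text or "").encode("cp1252", errors="replace")
--     out: list[str] = []
--     for byte in raw:
--         if byte in (0x28, 0x29, 0x5C):  # ( ) \
--             out.append("\\" + chr(byte))
--         elif 32 <= byte <= 126:
--             out.append(chr(byte))
--         else:
--             out.append(f"\\{byte:03o}")
--     return "(" + "".join(out) + ")"
-- ===== SOURCE B (Python) =====
-- # Run-based scan: safe printable runs are sliced and decoded in bulk; only the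
-- # occasional special/non-printable byte gets an individual escape.
-- def _pdf_literal_string(text: str) -> str:
--     raw = (text or "").encode("cp1252", errors="replace")
--     n = len(raw)
--     parts = ["("]
--     i = 0
--     while i < n:
--         j = i
--         while j < n and 32 <= raw[j] <= 126 and raw[j] not in (0x28, 0x29, 0x5C):
--             j += 1
--         parts.append(raw[i:j].decode("latin-1"))
--         if j < n:
--             b = raw[j]
--             parts.append("\\" + chr(b) if b in (0x28, 0x29, 0x5C) else f"\\{b:03o}")
--             j += 1
--         i = j
--     parts.append(")")
--     return "".join(parts)
-- ===== Notes on version B (the rewrite author's own statement) =====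
-- stated objective: alternative
-- what changed: Replaces A's per-byte branch-and-append loop by a run-based scan: maximal runs of safe printable bytes are located with an inner index loop, sliced and decoded in bulk, and only the single special/non-printable byte between runs is escaped individually.
import Mathlib
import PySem

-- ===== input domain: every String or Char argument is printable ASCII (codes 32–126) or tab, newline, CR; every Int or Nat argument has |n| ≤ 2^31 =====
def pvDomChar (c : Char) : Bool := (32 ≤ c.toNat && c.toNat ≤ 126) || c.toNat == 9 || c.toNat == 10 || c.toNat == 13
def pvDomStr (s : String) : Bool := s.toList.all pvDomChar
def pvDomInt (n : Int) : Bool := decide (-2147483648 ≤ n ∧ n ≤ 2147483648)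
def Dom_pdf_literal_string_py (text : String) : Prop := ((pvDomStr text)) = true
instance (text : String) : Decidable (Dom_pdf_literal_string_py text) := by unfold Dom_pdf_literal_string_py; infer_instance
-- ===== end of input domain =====

-- B scans maximal runs of safe printable bytes and copies each run with one bulk
-- slice-and-decode, escaping only the single unsafe byte between runs; equal output.

-- ===== PORT A =====
-- cp1252 encoding: on the admitted domain (ASCII 32–126 and tab/LF/CR) cp1252 is
-- exactly the Unicode code point, so encoding is the code-point map (exact on Dom).
def pvBytes (text : String) : List Nat := text.toList.map (fun c => c.toNat)

-- chr(b) for a byte value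
def pvChr (b : Nat) : String := String.ofList [Char.ofNat b]

-- f"\{b:03o}": backslash + three octal digits (exact for b < 512)
def pvOct3 (b : Nat) : String :=
  "\\" ++ String.ofList [Char.ofNat (48 + b / 64 % 8), Char.ofNat (48 + b / 8 % 8), Char.ofNat (48 + b % 8)]

def pdf_literal_string_py (text : String) : String :=
  let raw := pvBytes text
  let out : List String := raw.foldl (fun out byte =>
    if byte = 0x28 ∨ byte = 0x29 ∨ byte = 0x5C then out ++ ["\\" ++ pvChr byte]
    else if 32 ≤ byte ∧ byte ≤ 126 then out ++ [pvChr byte]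
    else out ++ [pvOct3 byte]) []
  "(" ++ String.join out ++ ")"

-- ===== PORT B =====
-- the inner while's continuation test: printable and not ( ) \
def pvSafe (b : Nat) : Bool := decide (32 ≤ b) && decide (b ≤ 126) && !(b == 0x28) && !(b == 0x29) && !(b == 0x5C)

-- raw[i:j].decode("latin-1"): each byte becomes its code point
def pvDecodeRun (run : List Nat) : String := String.ofList (run.map Char.ofNat)

-- the escape appended for the one unsafe byte ending a run
def pvEsc (b : Nat) : String :=
  if b = 0x28 ∨ b = 0x29 ∨ b = 0x5C then "\\" ++ pvChr b else pvOct3 b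

-- the outer while loop: append the maximal safe run in bulk, escape the next byte, continue
def pvChunks (raw : List Nat) : List String :=
  match h0 : raw with
  | [] => []
  | _ :: _ =>
    match hr : raw.dropWhile pvSafe with
    | [] => [pvDecodeRun (raw.takeWhile pvSafe)]
    | b :: bs => pvDecodeRun (raw.takeWhile pvSafe) :: pvEsc b :: pvChunks bs
termination_by raw.length
decreasing_by
  rw [← h0]
  have h := raw.length_dropWhile_le pvSafe
  rw [hr] at h
  simp only [List.length_cons] at h
  omega

def pdf_literal_string_py_alt (text : String) : String :=
  let raw := pvBytes text
  String.join (["("] ++ pvChunks raw ++ [")"])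

-- ===== PRECONDITION & SPEC =====
def Spec_pdf_literal_string_py (text : String) (out : String) : Prop := out = pdf_literal_string_py_alt text
instance (text : String) (out : String) : Decidable (Spec_pdf_literal_string_py text out) := by unfold Spec_pdf_literal_string_py; infer_instance

-- ===== CLAIM (what is proved, stated in full; the proofs are below) =====
def Claim_equal_pdf_literal_string_py : Prop := ∀ (text : String), Dom_pdf_literal_string_py text → Spec_pdf_literal_string_py text (pdf_literal_string_py text)

-- ===== LEMMAS AND PROOFS =====

-- A's per-byte result, named for the proofs
def pvEntryA (b : Nat) : String :=
  if b = 0x28 ∨ b = 0x29 ∨ b = 0x5C then "\\" ++ pvChr b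
  else if 32 ≤ b ∧ b ≤ 126 then pvChr b
  else pvOct3 b

-- A's accumulator loop builds the mapped list
theorem foldl_branch (raw : List Nat) (init : List String) :
    raw.foldl (fun out byte =>
      if byte = 0x28 ∨ byte = 0x29 ∨ byte = 0x5C then out ++ ["\\" ++ pvChr byte]
      else if 32 ≤ byte ∧ byte ≤ 126 then out ++ [pvChr byte]
      else out ++ [pvOct3 byte]) init
    = init ++ raw.map pvEntryA := by
  induction raw generalizing init with
  | nil => simp
  | cons b bs ih =>
      simp only [List.foldl_cons, List.map_cons, pvEntryA]
      split_ifs <;> rw [ih] <;> simp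

-- String.join over a fold: pulling the initial accumulator out
theorem foldl_append_init (l : List String) (a : String) :
    l.foldl (· ++ ·) a = a ++ l.foldl (· ++ ·) "" := by
  induction l generalizing a with
  | nil => simp
  | cons t ts ih =>
      simp only [List.foldl_cons]
      rw [ih (a ++ t), ih ("" ++ t)]
      simp [String.append_assoc]

theorem join_cons (s : String) (l : List String) : String.join (s :: l) = s ++ String.join l := by
  simp only [String.join, List.foldl_cons]
  rw [foldl_append_init l ("" ++ s)]; simp

theorem join_append (l1 l2 : List String) :
    String.join (l1 ++ l2) = String.join l1 ++ String.join l2 := by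
  induction l1 with
  | nil => simp [String.join]
  | cons s ss ih => simp only [List.cons_append, join_cons, ih, String.append_assoc]

-- on a safe byte A emits the bare character
theorem entryA_safe {b : Nat} (h : pvSafe b = true) : pvEntryA b = pvChr b := by
  simp only [pvSafe, Bool.and_eq_true, decide_eq_true_eq, beq_eq_false_iff_ne, ne_eq,
    Bool.not_eq_eq_eq_not, Bool.not_true] at h
  obtain ⟨⟨⟨⟨h1, h2⟩, h3⟩, h4⟩, h5⟩ := h
  simp [pvEntryA, h1, h2, h3, h4, h5]

-- on an unsafe byte A emits exactly B's escape
theorem entryA_unsafe {b : Nat} (h : pvSafe b = false) : pvEntryA b = pvEsc b := by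
  unfold pvEntryA pvEsc
  by_cases hs : b = 0x28 ∨ b = 0x29 ∨ b = 0x5C
  · simp [hs]
  · have hnp : ¬ (32 ≤ b ∧ b ≤ 126) := by
      intro hc
      have h28 : b ≠ 0x28 := fun e => hs (Or.inl e)
      have h29 : b ≠ 0x29 := fun e => hs (Or.inr (Or.inl e))
      have h5c : b ≠ 0x5C := fun e => hs (Or.inr (Or.inr e))
      simp [pvSafe, hc.1, hc.2, h28, h29, h5c] at h
    simp [hs, hnp]

-- bulk latin-1 decode of a run = concatenation of the per-character pieces
theorem decodeRun_eq (run : List Nat) :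
    pvDecodeRun run = String.join (run.map pvChr) := by
  induction run with
  | nil => rfl
  | cons b bs ih =>
      unfold pvDecodeRun pvChr at *
      rw [List.map_cons, show Char.ofNat b :: bs.map Char.ofNat = [Char.ofNat b] ++ bs.map Char.ofNat from rfl,
        String.ofList_append, ih, List.map_cons, join_cons]

-- the chunked join equals the per-byte mapped join
theorem join_chunks (raw : List Nat) :
    String.join (pvChunks raw) = String.join (raw.map pvEntryA) := by
  induction raw using pvChunks.induct with
  | case1 => simp [pvChunks]
  | case3 x xs b bs hr ih =>
      have hsplit := (x :: xs).takeWhile_append_dropWhile (p := pvSafe)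
      rw [hr] at hsplit
      have hb : pvSafe b = false := by
        have := List.head?_dropWhile_not pvSafe (x :: xs)
        rw [hr] at this; simpa using this
      have hrun : ∀ c ∈ (x :: xs).takeWhile pvSafe, pvSafe c = true :=
        fun c hc => List.mem_takeWhile_imp hc
      rw [pvChunks]
      split
      · rename_i heq; rw [hr] at heq; simp at heq
      · rename_i b' bs' heq
        rw [hr] at heq
        injection heq with h1 h2
        subst h1; subst h2
        rw [join_cons, join_cons, ih]
        conv_rhs => rw [← hsplit]
        rw [List.map_append, List.map_cons, join_append, join_cons]
        rw [decodeRun_eq, entryA_unsafe hb]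
        congr 2
        exact List.map_congr_left (fun c hc => (entryA_safe (hrun c hc)).symm)
  | case2 x xs hr =>
      have hsplit := (x :: xs).takeWhile_append_dropWhile (p := pvSafe)
      rw [hr, List.append_nil] at hsplit
      have hrun : ∀ c ∈ (x :: xs).takeWhile pvSafe, pvSafe c = true :=
        fun c hc => List.mem_takeWhile_imp hc
      rw [pvChunks]
      split
      · rw [join_cons]
        conv_rhs => rw [← hsplit]
        rw [decodeRun_eq]
        have hmap : List.map pvEntryA ((x :: xs).takeWhile pvSafe)
            = List.map pvChr ((x :: xs).takeWhile pvSafe) :=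
          List.map_congr_left (fun c hc => entryA_safe (hrun c hc))
        rw [hmap]
        simp [String.join]
      · rename_i b' bs' heq; rw [hr] at heq; simp at heq

-- ===== VERDICT (by name: the statement is the Claim_ definition above) =====
theorem pdf_literal_string_py_spec : Claim_equal_pdf_literal_string_py := by
  intro text hdom
  unfold Spec_pdf_literal_string_py pdf_literal_string_py pdf_literal_string_py_alt
  simp only [foldl_branch, List.nil_append]
  rw [join_append, join_append, join_cons, join_chunks]
  simp [String.append_assoc, String.join]
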